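-- pv_equiv track=rewrite | github.com/zhenjia2017/FAITH | faith/faithful_er/evidence_pruning/pruning.py | reason_after
-- ===== SOURCE A (Python) =====
-- def reason_after(main_timespans, constraint_timespans):
--     for main_timespan in main_timespans:
--         evi_begin = main_timespan[0]
--         for constraint_timespan in constraint_timespans:
--             constraint_start = constraint_timespan[0]
--             constraint_end = constraint_timespan[1]
--             if "0101" in str(constraint_start)[-4:] and "1231" in str(constraint_end)[-4:] and "0101" in str(
--                     evi_begin)[4:]:
--                 # constraint a year
--                 constraint_end = int(str(constraint_end)[:-4] + "0101")
--             if evi_begin >= constraint_end: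
--                 return True
--     return False
-- ===== SOURCE B (Python) =====
-- def reason_after(main_timespans, constraint_timespans):
--     # One pass over constraints: three running minima (raw end over all constraints,
--     # raw end over non-year constraints, adjusted end over year constraints),
--     # then one pass over main timespans.
--     min_all = min_nonyear = min_adj = None
--     for c in constraint_timespans:
--         start, end = c[0], c[1]
--         min_all = end if min_all is None or end < min_all else min_all
--         if str(start).endswith("0101") and str(end).endswith("1231"):
--             adj = int(str(end)[:-4] + "0101")
--             min_adj = adj if min_adj is None or adj < min_adj else min_adj
--         else:
--             min_nonyear = end if min_nonyear is None or end < min_nonyear else min_nonyear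
--     for m in main_timespans:
--         begin = m[0]
--         if "0101" in str(begin)[4:]:
--             if (min_nonyear is not None and begin >= min_nonyear) or \
--                (min_adj is not None and begin >= min_adj):
--                 return True
--         else:
--             if min_all is not None and begin >= min_all:
--                 return True
--     return False
-- ===== Notes on version B (the rewrite author's own statement) =====
-- stated objective: alternative
-- what changed: A rescans all constraint timespans for every main timespan; B makes one pass over the constraints computing three running minima (raw end over all, raw end over non-year constraints, adjusted end over year constraints) and then one pass over the main timespans comparing each begin against the appropriate minimum.
-- outside the precondition, e.g. on reason_after([[10]], [[0, 5], [1]]): A returns True, B raises IndexError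
import Mathlib
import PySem

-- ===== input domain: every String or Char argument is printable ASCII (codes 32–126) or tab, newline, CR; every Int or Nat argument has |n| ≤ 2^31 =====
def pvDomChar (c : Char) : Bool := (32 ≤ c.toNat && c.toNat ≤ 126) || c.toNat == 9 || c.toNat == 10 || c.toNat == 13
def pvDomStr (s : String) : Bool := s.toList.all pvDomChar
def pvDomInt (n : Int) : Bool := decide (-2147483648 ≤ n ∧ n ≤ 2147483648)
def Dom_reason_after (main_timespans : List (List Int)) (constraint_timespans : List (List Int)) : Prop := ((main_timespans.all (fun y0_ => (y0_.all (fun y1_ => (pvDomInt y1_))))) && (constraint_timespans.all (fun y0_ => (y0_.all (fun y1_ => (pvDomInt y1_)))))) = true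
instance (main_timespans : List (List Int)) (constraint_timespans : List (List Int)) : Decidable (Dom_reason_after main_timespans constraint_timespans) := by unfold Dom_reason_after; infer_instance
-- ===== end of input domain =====

-- B replaces A's nested rescan of the constraints by one pass over the constraints (three
-- running minima) plus one pass over the main timespans; return value proved equal on Pre_.

-- ===== PORT A =====
-- "0101" in str(constraint_start)[-4:] and "1231" in str(constraint_end)[-4:] and "0101" in str(evi_begin)[4:]
def pyCondA (evi_begin constraint_start constraint_end : Int) : Bool :=
  PySem.Chars.isIn "0101".toList (PySem.List.slice (PySem.Int.toChars constraint_start) (some (-4)) none)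
  && PySem.Chars.isIn "1231".toList (PySem.List.slice (PySem.Int.toChars constraint_end) (some (-4)) none)
  && PySem.Chars.isIn "0101".toList (PySem.List.slice (PySem.Int.toChars evi_begin) (some 4) none)

-- int(str(constraint_end)[:-4] + "0101"); always parses (digits with optional '-'), so getD 0 is never taken
def pyAdjA (constraint_end : Int) : Int :=
  (PySem.Int.ofChars? (PySem.List.slice (PySem.Int.toChars constraint_end) none (some (-4)) ++ "0101".toList)).getD 0

-- the inner 'for constraint_timespan in constraint_timespans' loop with its early 'return True'
def reason_after_inner (evi_begin : Int) : List (List Int) → Bool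
  | [] => false
  | ct :: rest =>
    match PySem.List.pyGet? ct 0, PySem.List.pyGet? ct 1 with
    | some cstart, some cend0 =>
      let cend := if pyCondA evi_begin cstart cend0 then pyAdjA cend0 else cend0
      if cend ≤ evi_begin then true else reason_after_inner evi_begin rest
    | _, _ => false  -- IndexError in Python; excluded by Pre_

def reason_after (main_timespans : List (List Int)) (constraint_timespans : List (List Int)) : Bool :=
  match main_timespans with
  | [] => false
  | mt :: rest =>
    match PySem.List.pyGet? mt 0 with
    | some evi_begin =>
      if reason_after_inner evi_begin constraint_timespans then true
      else reason_after rest constraint_timespans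
    | none => false  -- IndexError in Python; excluded by Pre_

-- ===== PORT B =====
-- running minimum: 'x if acc is None or x < acc else acc'
def pvMn : Option Int → Int → Option Int
  | none, x => some x
  | some a, x => if x < a then some x else some a

-- str(start).endswith("0101") and str(end).endswith("1231")
def pvYearB (cstart cend : Int) : Bool :=
  PySem.Chars.endswith (PySem.Int.toChars cstart) "0101".toList
  && PySem.Chars.endswith (PySem.Int.toChars cend) "1231".toList

-- int(str(end)[:-4] + "0101")
def pvAdjB (cend : Int) : Int :=
  (PySem.Int.ofChars? (PySem.List.slice (PySem.Int.toChars cend) none (some (-4)) ++ "0101".toList)).getD 0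

-- "0101" in str(begin)[4:]
def pvBeginB (b : Int) : Bool :=
  PySem.Chars.isIn "0101".toList (PySem.List.slice (PySem.Int.toChars b) (some 4) none)

-- first pass: (min_all, min_nonyear, min_adj)
def pvMinsB : List (List Int) → Option Int × Option Int × Option Int → Option Int × Option Int × Option Int
  | [], acc => acc
  | ct :: rest, (mA, mN, mAd) =>
    match PySem.List.pyGet? ct 0, PySem.List.pyGet? ct 1 with
    | some cstart, some cend =>
      if pvYearB cstart cend then pvMinsB rest (pvMn mA cend, mN, pvMn mAd (pvAdjB cend))
      else pvMinsB rest (pvMn mA cend, pvMn mN cend, mAd)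
    | _, _ => pvMinsB rest (mA, mN, mAd)  -- IndexError in Python; excluded by Pre_

-- 'o is not None and b >= o'
def pvGeB (o : Option Int) (b : Int) : Bool :=
  match o with | none => false | some v => v ≤ b

-- second pass over the main timespans
def pvScanB (mA mN mAd : Option Int) : List (List Int) → Bool
  | [] => false
  | mt :: rest =>
    match PySem.List.pyGet? mt 0 with
    | none => false  -- IndexError in Python; excluded by Pre_
    | some b =>
      if (if pvBeginB b then pvGeB mN b || pvGeB mAd b else pvGeB mA b) then true
      else pvScanB mA mN mAd rest

def reason_after_alt (main_timespans : List (List Int)) (constraint_timespans : List (List Int)) : Bool :=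
  let ms := pvMinsB constraint_timespans (none, none, none)
  pvScanB ms.1 ms.2.1 ms.2.2 main_timespans

-- ===== PRECONDITION & SPEC =====
-- Pre_ excludes inputs with an empty main timespan or a constraint timespan shorter than 2,
-- on which Python raises IndexError (A may return earlier only when an early True skips the
-- malformed element; B raises there).
def Pre_reason_after (main_timespans : List (List Int)) (constraint_timespans : List (List Int)) : Prop :=
  (∀ mt ∈ main_timespans, mt ≠ []) ∧ (∀ ct ∈ constraint_timespans, 2 ≤ ct.length)
instance (main_timespans : List (List Int)) (constraint_timespans : List (List Int)) : Decidable (Pre_reason_after main_timespans constraint_timespans) := by unfold Pre_reason_after; infer_instance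
def pvWitness_reason_after : List (List Int) × List (List Int) := ([[10], [20200101]], [[0, 5], [20200101, 20201231]])

def Spec_reason_after (main_timespans : List (List Int)) (constraint_timespans : List (List Int)) (out : Bool) : Prop := out = reason_after_alt main_timespans constraint_timespans
instance (main_timespans : List (List Int)) (constraint_timespans : List (List Int)) (out : Bool) : Decidable (Spec_reason_after main_timespans constraint_timespans out) := by unfold Spec_reason_after; infer_instance

-- ===== CLAIM (what is proved, stated in full; the proofs are below) =====
def Claim_equal_reason_after : Prop := ∀ (main_timespans : List (List Int)) (constraint_timespans : List (List Int)), Dom_reason_after main_timespans constraint_timespans → Pre_reason_after main_timespans constraint_timespans → Spec_reason_after main_timespans constraint_timespans (reason_after main_timespans constraint_timespans)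

-- ===== LEMMAS AND PROOFS =====

-- s[-4:] contains a 4-char pattern iff the pattern is a suffix of s
theorem pv_isIn_slice_neg4 (p s : List Char) (hp : p.length = 4) :
    PySem.Chars.isIn p (PySem.List.slice s (some (-4)) none) = PySem.Chars.endswith s p := by
  rw [PySem.List.slice_from_neg_ofNat s 4 (by omega)]
  by_cases h : p <:+ s
  · have hd : s.drop (s.length - 4) = p := by
      obtain ⟨t, ht⟩ := h
      subst ht
      have hlen : (t ++ p).length - 4 = t.length := by simp [hp]
      rw [hlen, List.drop_left]
    have h1 : PySem.Chars.isIn p p = true := by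
      simp [PySem.Chars.isIn_iff_infix]
    have h2 : PySem.Chars.endswith s p = true := by rw [PySem.Chars.endswith_iff]; exact h
    rw [hd, h1, h2]
  · have h2 : PySem.Chars.endswith s p = false := by
      rw [← Bool.not_eq_true, PySem.Chars.endswith_iff]; exact h
    have h1 : PySem.Chars.isIn p (s.drop (s.length - 4)) = false := by
      rw [PySem.Chars.isIn_eq_false_iff]
      intro hinf
      have hle : (s.drop (s.length - 4)).length ≤ p.length := by
        simp [hp]; omega
      have := List.IsInfix.eq_of_length_le hinf hle
      exact h (this ▸ List.drop_suffix (s.length - 4) s)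
    rw [h1, h2]

theorem pv_condA_eq (b cstart cend : Int) :
    pyCondA b cstart cend = (pvYearB cstart cend && pvBeginB b) := by
  unfold pyCondA pvYearB pvBeginB
  rw [pv_isIn_slice_neg4 _ _ (by decide), pv_isIn_slice_neg4 _ _ (by decide)]

theorem pv_pyGet01 (xs : List Int) (h : 2 ≤ xs.length) :
    PySem.List.pyGet? xs 0 = some (xs[0]?.getD 0) ∧ PySem.List.pyGet? xs 1 = some (xs[1]?.getD 0) := by
  match xs, h with
  | a :: b :: t, _ => constructor <;> simp [pysem]

theorem pv_pyGet0 (xs : List Int) (h : xs ≠ []) :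
    PySem.List.pyGet? xs 0 = some (xs[0]?.getD 0) := by
  match xs, h with
  | a :: t, _ => simp [pysem]

theorem pv_adj_eq (e : Int) : pyAdjA e = pvAdjB e := rfl

-- the inner loop of A is an 'any' over the constraints
theorem pv_innerA_any (b : Int) (cs : List (List Int)) (hwf : ∀ ct ∈ cs, 2 ≤ ct.length) :
    reason_after_inner b cs
      = cs.any (fun ct => decide ((if pvYearB (ct[0]?.getD 0) (ct[1]?.getD 0) && pvBeginB b then pvAdjB (ct[1]?.getD 0) else (ct[1]?.getD 0)) ≤ b)) := by
  induction cs with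
  | nil => rfl
  | cons ct rest ih =>
    have h2 : 2 ≤ ct.length := hwf ct (by simp)
    obtain ⟨h0, h1⟩ := pv_pyGet01 ct h2
    rw [List.any_cons, ← ih (fun x hx => hwf x (by simp [hx]))]
    simp only [reason_after_inner, h0, h1, pv_condA_eq, pv_adj_eq]
    simp

theorem pv_geB_mn (o : Option Int) (x b : Int) :
    pvGeB (pvMn o x) b = (pvGeB o b || decide (x ≤ b)) := by
  cases o with
  | none => simp [pvMn, pvGeB]
  | some a =>
    simp only [pvMn, pvGeB]
    by_cases h : x < a <;> by_cases h2 : a ≤ b <;> simp [h, h2] <;> omega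

-- the three minima characterize membership thresholds
theorem pv_minsB_spec (b : Int) (cs : List (List Int)) (hwf : ∀ ct ∈ cs, 2 ≤ ct.length) :
    ∀ acc : Option Int × Option Int × Option Int,
      pvGeB (pvMinsB cs acc).1 b = (pvGeB acc.1 b || cs.any (fun ct => decide ((ct[1]?.getD 0) ≤ b)))
      ∧ pvGeB (pvMinsB cs acc).2.1 b
          = (pvGeB acc.2.1 b || cs.any (fun ct => !pvYearB (ct[0]?.getD 0) (ct[1]?.getD 0) && decide ((ct[1]?.getD 0) ≤ b)))
      ∧ pvGeB (pvMinsB cs acc).2.2 b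
          = (pvGeB acc.2.2 b || cs.any (fun ct => pvYearB (ct[0]?.getD 0) (ct[1]?.getD 0) && decide (pvAdjB (ct[1]?.getD 0) ≤ b))) := by
  induction cs with
  | nil => intro acc; simp [pvMinsB]
  | cons ct rest ih =>
    intro ⟨mA, mN, mAd⟩
    have h2 : 2 ≤ ct.length := hwf ct (by simp)
    obtain ⟨h0, h1⟩ := pv_pyGet01 ct h2
    have ih' := ih (fun x hx => hwf x (by simp [hx]))
    simp only [pvMinsB, h0, h1]
    by_cases hy : pvYearB (ct[0]?.getD 0) (ct[1]?.getD 0) = true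
    · rw [if_pos hy]
      obtain ⟨e1, e2, e3⟩ := ih' (pvMn mA (ct[1]?.getD 0), mN, pvMn mAd (pvAdjB (ct[1]?.getD 0)))
      refine ⟨?_, ?_, ?_⟩
      · rw [e1]; simp [pv_geB_mn, Bool.or_assoc]
      · rw [e2]; simp [hy]
      · rw [e3]; simp [pv_geB_mn, hy, Bool.or_assoc]
    · rw [if_neg hy]
      obtain ⟨e1, e2, e3⟩ := ih' (pvMn mA (ct[1]?.getD 0), pvMn mN (ct[1]?.getD 0), mAd)
      refine ⟨?_, ?_, ?_⟩
      · rw [e1]; simp [pv_geB_mn, Bool.or_assoc]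
      · rw [e2]; simp [pv_geB_mn, hy, Bool.or_assoc]
      · rw [e3]; simp [hy]

-- distribute the 'any' over the per-constraint if, when the begin condition holds
theorem pv_any_eff_true (b : Int) (hbg : pvBeginB b = true) (cs : List (List Int)) :
    cs.any (fun ct => decide ((if pvYearB (ct[0]?.getD 0) (ct[1]?.getD 0) && pvBeginB b then pvAdjB (ct[1]?.getD 0) else (ct[1]?.getD 0)) ≤ b))
      = (cs.any (fun ct => !pvYearB (ct[0]?.getD 0) (ct[1]?.getD 0) && decide ((ct[1]?.getD 0) ≤ b))
          || cs.any (fun ct => pvYearB (ct[0]?.getD 0) (ct[1]?.getD 0) && decide (pvAdjB (ct[1]?.getD 0) ≤ b))) := by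
  induction cs with
  | nil => rfl
  | cons ct rest ih =>
    simp only [hbg, Bool.and_true] at ih ⊢
    simp only [List.any_cons, ih]
    by_cases hy : pvYearB (ct[0]?.getD 0) (ct[1]?.getD 0) = true
    · simp [hy, Bool.or_left_comm]
    · simp [hy, Bool.or_assoc]

-- when the begin condition fails, the adjustment never fires
theorem pv_any_eff_false (b : Int) (hbg : pvBeginB b = false) (cs : List (List Int)) :
    cs.any (fun ct => decide ((if pvYearB (ct[0]?.getD 0) (ct[1]?.getD 0) && pvBeginB b then pvAdjB (ct[1]?.getD 0) else (ct[1]?.getD 0)) ≤ b))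
      = cs.any (fun ct => decide ((ct[1]?.getD 0) ≤ b)) := by
  induction cs with
  | nil => rfl
  | cons ct rest ih => simp only [List.any_cons, hbg, Bool.and_false, if_neg Bool.false_ne_true]

-- per-begin equivalence: A's inner loop equals B's threshold test
theorem pv_per_begin (b : Int) (cs : List (List Int)) (hwf : ∀ ct ∈ cs, 2 ≤ ct.length) :
    reason_after_inner b cs
      = (if pvBeginB b
          then pvGeB (pvMinsB cs (none, none, none)).2.1 b || pvGeB (pvMinsB cs (none, none, none)).2.2 b
          else pvGeB (pvMinsB cs (none, none, none)).1 b) := by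
  obtain ⟨e1, e2, e3⟩ := pv_minsB_spec b cs hwf (none, none, none)
  rw [pv_innerA_any b cs hwf]
  by_cases hbg : pvBeginB b
  · rw [if_pos hbg, e2, e3]
    simp only [pvGeB, Bool.false_or]
    exact pv_any_eff_true b hbg cs
  · rw [if_neg hbg, e1]
    simp only [pvGeB, Bool.false_or]
    exact pv_any_eff_false b (Bool.not_eq_true _ ▸ eq_false_of_ne_true hbg) cs

theorem pv_outer (mains cons : List (List Int)) (hc : ∀ ct ∈ cons, 2 ≤ ct.length)
    (hm : ∀ mt ∈ mains, mt ≠ []) : reason_after mains cons = reason_after_alt mains cons := by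
  unfold reason_after_alt
  induction mains with
  | nil => rfl
  | cons mt rest ih =>
    have hne : mt ≠ [] := hm mt (by simp)
    have h0 := pv_pyGet0 mt hne
    simp only [reason_after, pvScanB, h0]
    rw [pv_per_begin (mt[0]?.getD 0) cons hc]
    rw [ih (fun x hx => hm x (by simp [hx]))]

-- ===== VERDICT (by name: the statement is the Claim_ definition above) =====
theorem reason_after_spec : Claim_equal_reason_after := by
  intro mains cons _ hpre
  exact pv_outer mains cons hpre.2 hpre.1
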